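-- pv_equiv track=rewrite | github.com/bioShaun/omSnpScore | snpScore.py | merge_allele_inf
-- ===== SOURCE A (Python) =====
-- from itertools import zip_longest
--
-- def merge_allele_inf(row):
--     row_list = []
--     for col_i in row:
--         col_i_reads = [int(each) for each in str(col_i).split(',')]
--         row_list.append(col_i_reads)
--     merge_row_list = zip_longest(*row_list)
--     merge_row_str_list = [str(sum(filter(None, each)))
--                           for each in merge_row_list]
--     return ','.join(merge_row_str_list)
-- ===== SOURCE B (Python) =====
-- def merge_allele_inf(row):
--     sums = []
--     for col_i in row:
--         vals = [int(each) for each in str(col_i).split(',')]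
--         for i, v in enumerate(vals):
--             if i < len(sums):
--                 sums[i] += v
--             else:
--                 sums.append(v)
--     return ','.join(str(s) for s in sums)
-- ===== Notes on version B (the rewrite author's own statement) =====
-- stated objective: alternative
-- what changed: Replaces parse-all-then-zip_longest-transpose-and-sum with a single forward pass that folds each parsed column into a running accumulator list (pairwise add, appending the overhang).
import Mathlib
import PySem

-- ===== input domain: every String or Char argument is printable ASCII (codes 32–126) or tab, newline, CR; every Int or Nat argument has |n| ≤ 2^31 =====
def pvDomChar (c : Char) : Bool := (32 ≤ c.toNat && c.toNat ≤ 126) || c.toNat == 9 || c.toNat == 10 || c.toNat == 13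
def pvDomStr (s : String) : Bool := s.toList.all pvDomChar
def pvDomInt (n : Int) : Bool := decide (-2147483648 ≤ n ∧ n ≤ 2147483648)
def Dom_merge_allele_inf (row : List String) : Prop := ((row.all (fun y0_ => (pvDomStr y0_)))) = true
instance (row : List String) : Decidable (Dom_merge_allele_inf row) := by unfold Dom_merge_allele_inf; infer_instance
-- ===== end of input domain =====

-- B replaces the parse-then-zip_longest-transpose of A by a single forward accumulation
-- pass over the columns (objective: alternative decomposition, same asymptotic cost).

-- ===== PORT A =====

-- [int(each) for each in str(col_i).split(',')]; on a token int() rejects the port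
-- defaults to 0 where the Python raises ValueError — those inputs are excluded by Pre_ below.
def pvParseCol (s : String) : List Int :=
  (PySem.Chars.splitOn s.toList [',']).map (fun t => (PySem.Int.ofChars? t).getD 0)

-- Python truthiness on the zip_longest cells: None and 0 are falsy (filter(None, each))
def pvTruthy (o : Option Int) : Bool :=
  match o with
  | none => false
  | some v => v != 0

-- str(sum(filter(None, each))) without the final str
def pvSumRow (each : List (Option Int)) : Int :=
  ((each.filter pvTruthy).map (fun o => o.getD 0)).sum

-- total length never grows under tails (used for termination of pvZipLongest)
theorem pvTails_sum_le (ls : List (List Int)) :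
    ((ls.map List.tail).map List.length).sum ≤ (ls.map List.length).sum := by
  induction ls with
  | nil => simp
  | cons c cs ih =>
      simp only [List.map_cons, List.sum_cons]
      have : c.tail.length ≤ c.length := by cases c <;> simp
      omega

-- total length strictly decreases when some list is nonempty (termination of pvZipLongest)
theorem pvTails_sum_lt (ls : List (List Int)) (h : ls.all List.isEmpty = false) :
    ((ls.map List.tail).map List.length).sum < (ls.map List.length).sum := by
  induction ls with
  | nil => simp at h
  | cons c cs ih =>
      simp only [List.all_cons, Bool.and_eq_false_iff] at h
      simp only [List.map_cons, List.sum_cons]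
      cases c with
      | nil =>
          have hcs : cs.all List.isEmpty = false := by
            rcases h with h | h
            · simp at h
            · exact h
          have := ih hcs
          simpa using this
      | cons x xs =>
          have := pvTails_sum_le cs
          simp only [List.tail_cons, List.length_cons]
          omega

-- itertools.zip_longest(*row_list): emit the heads (None when exhausted) while any list is nonempty
def pvZipLongest (ls : List (List Int)) : List (List (Option Int)) :=
  if h : ls.all List.isEmpty = true then []
  else (ls.map List.head?) :: pvZipLongest (ls.map List.tail)
termination_by (ls.map List.length).sum
decreasing_by
  have := pvTails_sum_lt ls (by simpa using h)
  simpa using this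

def merge_allele_inf (row : List String) : String :=
  let row_list := row.map pvParseCol
  let merge_row_list := pvZipLongest row_list
  let merge_row_str_list := merge_row_list.map (fun each => PySem.Int.toStr (pvSumRow each))
  PySem.Str.join "," merge_row_str_list

-- ===== PORT B =====

-- fold one parsed column into the accumulator: add pairwise, append the overhang
def pvAdd (sums vals : List Int) : List Int :=
  match sums, vals with
  | sums, [] => sums
  | [], v :: vs => v :: vs
  | s :: ss, v :: vs => (s + v) :: pvAdd ss vs

def merge_allele_inf_alt (row : List String) : String :=
  let sums := row.foldl (fun sums col => pvAdd sums (pvParseCol col)) []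
  PySem.Str.join "," (sums.map (fun s => PySem.Int.toStr s))

-- ===== PRECONDITION & SPEC =====
-- exactly the inputs where every comma-separated token parses as a Python int
-- (otherwise A raises ValueError)
def Pre_merge_allele_inf (row : List String) : Prop :=
  (row.all (fun s => (PySem.Chars.splitOn s.toList [',']).all
      (fun t => (PySem.Int.ofChars? t).isSome))) = true
instance (row : List String) : Decidable (Pre_merge_allele_inf row) := by
  unfold Pre_merge_allele_inf; infer_instance

def pvWitness_merge_allele_inf : List String := ["5,6,7"]

def Spec_merge_allele_inf (row : List String) (out : String) : Prop := out = merge_allele_inf_alt row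
instance (row : List String) (out : String) : Decidable (Spec_merge_allele_inf row out) := by unfold Spec_merge_allele_inf; infer_instance

-- ===== CLAIM (what is proved, stated in full; the proofs are below) =====
def Claim_equal_merge_allele_inf : Prop := ∀ (row : List String), Dom_merge_allele_inf row → Pre_merge_allele_inf row → Spec_merge_allele_inf row (merge_allele_inf row)

-- ===== LEMMAS AND PROOFS =====

-- unfolding equations for the well-founded pvZipLongest
theorem pvZL_empty (ls : List (List Int)) (h : ls.all List.isEmpty = true) :
    pvZipLongest ls = [] := by
  unfold pvZipLongest
  simp [h]

theorem pvZL_step (ls : List (List Int)) (h : ls.all List.isEmpty = false) :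
    pvZipLongest ls = (ls.map List.head?) :: pvZipLongest (ls.map List.tail) := by
  conv_lhs => unfold pvZipLongest
  simp [h]

-- row sum with None/0 treated as 0 (the filter does not change the sum)
def pvRS (e : List (Option Int)) : Int := (e.map (fun o => o.getD 0)).sum

theorem pvSumRow_eq_pvRS (e : List (Option Int)) : pvSumRow e = pvRS e := by
  simp only [pvSumRow, pvRS]
  induction e with
  | nil => rfl
  | cons o rest ih =>
      rw [List.filter_cons]
      cases o with
      | none => simpa [pvTruthy] using ih
      | some v =>
          by_cases hv : v = 0
          · subst hv; simpa [pvTruthy] using ih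
          · simp [pvTruthy, hv, ih]

theorem pvAdd_nil_left (b : List Int) : pvAdd [] b = b := by
  cases b <;> rfl

theorem pvAdd_nil_right (a : List Int) : pvAdd a [] = a := by
  cases a <;> rfl

theorem pvAdd_comm (a b : List Int) : pvAdd a b = pvAdd b a := by
  induction a generalizing b with
  | nil => simp [pvAdd_nil_left, pvAdd_nil_right]
  | cons x xs ih =>
      cases b with
      | nil => simp [pvAdd_nil_left, pvAdd_nil_right]
      | cons y ys => simp [pvAdd, ih ys]; ring

theorem pvAdd_assoc (a b c : List Int) : pvAdd (pvAdd a b) c = pvAdd a (pvAdd b c) := by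
  induction a generalizing b c with
  | nil => simp [pvAdd_nil_left]
  | cons x xs ih =>
      cases b with
      | nil => simp [pvAdd_nil_left, pvAdd_nil_right]
      | cons y ys =>
          cases c with
          | nil => simp [pvAdd_nil_right, pvAdd]
          | cons z zs => simp [pvAdd, ih ys zs]; ring

theorem pvRS_heads_empty (cs : List (List Int)) (h : ∀ x ∈ cs, x = []) :
    pvRS (cs.map List.head?) = 0 := by
  induction cs with
  | nil => rfl
  | cons c rest ih =>
      have hc : c = [] := h c (by simp)
      subst hc
      have hrest := ih (fun x hx => h x (by simp [hx]))
      simp only [pvRS, List.map_map] at hrest ⊢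
      simp [hrest]

theorem pvAll_empty_iff (cs : List (List Int)) :
    cs.all List.isEmpty = true ↔ ∀ x ∈ cs, x = [] := by
  simp [List.all_eq_true, List.isEmpty_iff]

-- the key transpose/accumulate bridge:
-- row sums of zip_longest(c :: cs) = (row sums of zip_longest(cs)) ⊕ c
theorem pvZL_cons_bound (n : Nat) :
    ∀ (c : List Int) (cs : List (List Int)),
      (((c :: cs).map List.length).sum ≤ n) →
      (pvZipLongest (c :: cs)).map pvRS = pvAdd ((pvZipLongest cs).map pvRS) c := by
  induction n with
  | zero =>
      intro c cs hle
      have hall : (c :: cs).all List.isEmpty = true := by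
        rw [pvAll_empty_iff]
        intro x hx
        have hmem : x.length ∈ ((c :: cs).map List.length) := List.mem_map_of_mem hx
        have := List.le_sum_of_mem hmem
        have : x.length = 0 := by omega
        exact List.eq_nil_of_length_eq_zero this
      have hc : c = [] := (pvAll_empty_iff (c :: cs)).mp hall c (by simp)
      have hcs : cs.all List.isEmpty = true := by
        rw [pvAll_empty_iff] at hall ⊢
        exact fun x hx => hall x (by simp [hx])
      rw [pvZL_empty _ hall, pvZL_empty _ hcs]
      simp [hc, pvAdd_nil_right]
  | succ n ih =>
      intro c cs hle
      by_cases hall : (c :: cs).all List.isEmpty = true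
      · have hc : c = [] := (pvAll_empty_iff (c :: cs)).mp hall c (by simp)
        have hcs : cs.all List.isEmpty = true := by
          rw [pvAll_empty_iff] at hall ⊢
          exact fun x hx => hall x (by simp [hx])
        rw [pvZL_empty _ hall, pvZL_empty _ hcs]
        simp [hc, pvAdd_nil_right]
      · have hall' : (c :: cs).all List.isEmpty = false := by
          simpa using (Bool.eq_false_iff.mpr hall)
        rw [pvZL_step _ hall']
        simp only [List.map_cons]
        have hdec := pvTails_sum_lt (c :: cs) hall'
        have hbound : (((c.tail :: cs.map List.tail)).map List.length).sum ≤ n := by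
          simp only [List.map_cons] at hdec hle ⊢
          omega
        rw [ih c.tail (cs.map List.tail) hbound]
        by_cases hcs : cs.all List.isEmpty = true
        · -- all other columns exhausted: result is just c (which must be nonempty here)
          have hcsl : ∀ x ∈ cs, x = [] := (pvAll_empty_iff cs).mp hcs
          have hcst : (cs.map List.tail).all List.isEmpty = true := by
            rw [pvAll_empty_iff]
            intro x hx
            rcases List.mem_map.mp hx with ⟨y, hy, rfl⟩
            simp [hcsl y hy]
          have hcne : c ≠ [] := by
            intro hc0
            apply hall
            rw [pvAll_empty_iff]
            intro x hx
            rcases List.mem_cons.mp hx with rfl | hx'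
            · exact hc0
            · exact hcsl x hx'
          rcases c with _ | ⟨h, t⟩
          · exact absurd rfl hcne
          · rw [pvZL_empty _ hcs, pvZL_empty _ hcst]
            simp only [List.map_nil, pvAdd_nil_left, List.tail_cons, List.head?_cons]
            have hh : pvRS (some h :: cs.map List.head?) = h := by
              have := pvRS_heads_empty cs hcsl
              simp only [pvRS, List.map_map] at this ⊢
              simp [this]
            rw [hh]
        · have hcs' : cs.all List.isEmpty = false := by
            simpa using (Bool.eq_false_iff.mpr hcs)
          rw [pvZL_step _ hcs']
          rcases c with _ | ⟨h, t⟩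
          · simp only [List.head?_nil, List.tail_nil, List.map_cons, pvAdd_nil_right]
            have hnone : pvRS (none :: cs.map List.head?) = pvRS (cs.map List.head?) := by
              simp [pvRS]
            rw [hnone]
          · simp only [List.head?_cons, List.tail_cons, List.map_cons, pvAdd]
            have hsome : pvRS (some h :: cs.map List.head?) = pvRS (cs.map List.head?) + h := by
              simp [pvRS]; ring
            rw [hsome]

theorem pvZL_cons (c : List Int) (cs : List (List Int)) :
    (pvZipLongest (c :: cs)).map pvRS = pvAdd ((pvZipLongest cs).map pvRS) c :=
  pvZL_cons_bound (((c :: cs).map List.length).sum) c cs (le_refl _)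

-- the accumulator fold computes the row sums of the transpose
theorem pvFoldl_eq_zl (cs : List (List Int)) :
    ∀ s : List Int, cs.foldl pvAdd s = pvAdd ((pvZipLongest cs).map pvRS) s := by
  induction cs with
  | nil =>
      intro s
      rw [pvZL_empty _ (by simp)]
      simp [pvAdd_nil_left]
  | cons c rest ih =>
      intro s
      rw [List.foldl_cons, ih (pvAdd s c), pvZL_cons]
      rw [pvAdd_comm s c, ← pvAdd_assoc]

theorem pvPorts_core (ps : List (List Int)) :
    (pvZipLongest ps).map pvRS = ps.foldl pvAdd [] := by
  rw [pvFoldl_eq_zl ps [], pvAdd_nil_right]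

-- ===== VERDICT (by name: the statement is the Claim_ definition above) =====
theorem merge_allele_inf_spec : Claim_equal_merge_allele_inf := by
  intro row _ _
  show PySem.Str.join ","
      ((pvZipLongest (row.map pvParseCol)).map (fun each => PySem.Int.toStr (pvSumRow each)))
    = PySem.Str.join ","
      ((row.foldl (fun sums col => pvAdd sums (pvParseCol col)) []).map
        (fun s => PySem.Int.toStr s))
  have hfold : row.foldl (fun sums col => pvAdd sums (pvParseCol col)) []
      = (row.map pvParseCol).foldl pvAdd [] := by
    rw [List.foldl_map]
  rw [hfold, ← pvPorts_core, List.map_map]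
  simp [pvSumRow_eq_pvRS, Function.comp_def]
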